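-- pv_equiv track=rewrite | github.com/DorkmasterFlek/smrpg_web_randomizer | randomizer/logic/dialogs.py | allocate_string
-- ===== SOURCE A (Python) =====
-- def allocate_string(string_length, free_list):
--     for base in sorted(free_list, key=lambda x: free_list[x]):
--          if free_list[base] >= string_length:
--             size = free_list[base]
--             del free_list[base]
--             free_list[base+string_length] = size - string_length
--             return base
--             break
--     else:
--         return None
-- ===== SOURCE B (Python) =====
-- def allocate_string(string_length, free_list):
--     # Single linear pass: track the smallest free block that fits (first one
--     # in dict order on ties -- same winner as A's stable sort by size).
--     best = None
--     for base, size in free_list.items():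
--         if size >= string_length and (best is None or size < best[1]):
--             best = (base, size)
--     if best is None:
--         return None
--     base, size = best
--     del free_list[base]
--     free_list[base + string_length] = size - string_length
--     return base
-- ===== Notes on version B (the rewrite author's own statement) =====
-- stated objective: faster
-- what changed: Replaces A's sort-of-all-keys-by-size followed by a first-fit scan with a single linear pass that keeps the running minimum block size >= string_length (strict < keeps the first of equal sizes, matching the stable sort).
import Mathlib
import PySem

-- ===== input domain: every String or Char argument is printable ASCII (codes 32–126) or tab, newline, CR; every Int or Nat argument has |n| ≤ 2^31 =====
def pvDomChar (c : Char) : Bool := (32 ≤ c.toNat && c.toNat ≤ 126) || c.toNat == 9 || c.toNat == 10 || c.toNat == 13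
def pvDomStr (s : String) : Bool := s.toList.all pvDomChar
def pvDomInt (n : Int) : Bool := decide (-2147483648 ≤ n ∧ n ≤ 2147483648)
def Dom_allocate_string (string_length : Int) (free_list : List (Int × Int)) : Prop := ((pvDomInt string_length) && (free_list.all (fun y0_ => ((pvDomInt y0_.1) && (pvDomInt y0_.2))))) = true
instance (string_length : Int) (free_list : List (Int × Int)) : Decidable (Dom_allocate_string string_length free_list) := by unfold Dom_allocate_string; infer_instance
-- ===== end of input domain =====

-- B replaces A's sort-by-size-then-first-fit with one linear minimum-tracking pass (same result);
-- both Pythons mutate free_list identically — the equivalence proved here is about the RETURN value.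

-- ===== PORT A =====
-- A: iterate the keys sorted by their size (stable sort), return the first base whose size fits.
-- free_list[x] is ported as getD _ 0: exact here, since the looked-up key always comes from the dict's own keys.
def allocate_string (string_length : Int) (free_list : List (Int × Int)) : Option Int :=
  let d := PySem.Dict.ofList free_list
  (PySem.List.sorted d.keys (fun x => d.getD x 0) false).find?
    (fun base => decide (string_length ≤ d.getD base 0))

-- ===== PORT B =====
-- B: one pass over the items keeping the best (smallest fitting) block seen so far.
def allocate_string_alt (string_length : Int) (free_list : List (Int × Int)) : Option Int :=
  let d := PySem.Dict.ofList free_list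
  let best := d.items.foldl
    (fun (best : Option (Int × Int)) p =>
      if string_length ≤ p.2 && (match best with | none => true | some b => decide (p.2 < b.2)) then
        some p
      else best) none
  best.map Prod.fst

-- ===== PRECONDITION & SPEC =====
def Spec_allocate_string (string_length : Int) (free_list : List (Int × Int)) (out : Option Int) : Prop := out = allocate_string_alt string_length free_list
instance (string_length : Int) (free_list : List (Int × Int)) (out : Option Int) : Decidable (Spec_allocate_string string_length free_list out) := by unfold Spec_allocate_string; infer_instance

-- ===== CLAIM (what is proved, stated in full; the proofs are below) =====
def Claim_equal_allocate_string : Prop := ∀ (string_length : Int) (free_list : List (Int × Int)), Dom_allocate_string string_length free_list → Spec_allocate_string string_length free_list (allocate_string string_length free_list)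

-- ===== LEMMAS AND PROOFS =====

-- One insertion-sort step: the first fitting element of (insert x s) is x exactly when
-- x fits and beats the previous first fit (no ordering assumption on s is needed:
-- when x is placed before a non-fitting h, x's key is below h's, hence below L too).
lemma find?_insertBy (key : Int → Int) (L x : Int) (s : List Int) :
    (PySem.List.insertBy (fun a b => decide (key a < key b)) x s).find?
        (fun k => decide (L ≤ key k))
    = if decide (L ≤ key x) && (match s.find? (fun k => decide (L ≤ key k)) with
                      | none => true | some b => decide (key x < key b)) then
        some x
      else s.find? (fun k => decide (L ≤ key k)) := by
  induction s with
  | nil =>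
    by_cases hx : L ≤ key x <;> simp [PySem.List.insertBy, List.find?, hx]
  | cons h t ih =>
    by_cases hcmp : key x < key h
    · rw [show PySem.List.insertBy (fun a b => decide (key a < key b)) x (h :: t)
          = x :: h :: t from by simp [PySem.List.insertBy, hcmp]]
      by_cases hx : L ≤ key x
      · have hh : L ≤ key h := by omega
        simp [List.find?, hx, hh, hcmp]
      · simp [List.find?, hx]
    · rw [show PySem.List.insertBy (fun a b => decide (key a < key b)) x (h :: t)
          = h :: PySem.List.insertBy (fun a b => decide (key a < key b)) x t from by
            simp [PySem.List.insertBy, hcmp]]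
      by_cases hh : L ≤ key h
      · simp only [List.find?, hh, decide_true]
        rw [if_neg]
        simp only [Bool.and_eq_true, decide_eq_true_eq]
        rintro ⟨-, hxh⟩
        exact hcmp hxh
      · simp [List.find?, hh, ih]

-- A's whole loop: first-fit over the stable sort = running minimum-fit over the original order.
lemma sorted_find?_eq_foldl (key : Int → Int) (L : Int) (ks : List Int) :
    (PySem.List.sorted ks key false).find? (fun k => decide (L ≤ key k))
    = ks.foldl (fun acc k =>
        if L ≤ key k && (match acc with | none => true | some b => decide (key k < key b)) then
          some k
        else acc) none := by
  induction ks using List.reverseRecOn with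
  | nil => simp [PySem.List.sorted_eq_foldl_insertBy]
  | append_singleton xs x ih =>
    rw [PySem.List.sorted_eq_foldl_insertBy, List.foldl_append, List.foldl_append]
    simp only [List.foldl_cons, List.foldl_nil]
    rw [← PySem.List.sorted_eq_foldl_insertBy, find?_insertBy, ← ih]

-- The key-level fold over d.keys is the item-level fold of B, when key p.1 = p.2 on members.
lemma foldl_keys_eq_foldl_items (key : Int → Int) (L : Int) (l : List (Int × Int))
    (acc : Option (Int × Int))
    (hl : ∀ p ∈ l, key p.1 = p.2) (hacc : ∀ b, acc = some b → key b.1 = b.2) :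
    (l.map Prod.fst).foldl (fun a k =>
        if L ≤ key k && (match a with | none => true | some b => decide (key k < key b)) then
          some k
        else a) (acc.map Prod.fst)
    = (l.foldl (fun a p =>
        if L ≤ p.2 && (match a with | none => true | some b => decide (p.2 < b.2)) then
          some p
        else a) acc).map Prod.fst := by
  induction l generalizing acc with
  | nil => simp
  | cons p t ih =>
    have hp : key p.1 = p.2 := hl p (List.mem_cons_self ..)
    have hl' : ∀ q ∈ t, key q.1 = q.2 := fun q hq => hl q (List.mem_cons_of_mem _ hq)
    cases acc with
    | none =>
      simp only [List.map_cons, List.foldl_cons, Option.map_none, hp]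
      by_cases hc : (decide (L ≤ p.2) && true) = true
      · rw [if_pos hc, if_pos hc]
        exact ih (some p) hl' (fun b hb => by cases hb; exact hp)
      · rw [if_neg hc, if_neg hc]
        exact ih none hl' (fun b hb => by cases hb)
    | some b =>
      have hb : key b.1 = b.2 := hacc b rfl
      simp only [List.map_cons, List.foldl_cons, Option.map_some, hp, hb]
      by_cases hc : (decide (L ≤ p.2) && decide (p.2 < b.2)) = true
      · rw [if_pos hc, if_pos hc]
        exact ih (some p) hl' (fun c hc' => by cases hc'; exact hp)
      · rw [if_neg hc, if_neg hc]
        exact ih (some b) hl' (fun c hc' => by cases hc'; exact hb)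

-- ===== VERDICT (by name: the statement is the Claim_ definition above) =====
theorem allocate_string_spec : Claim_equal_allocate_string := by
  intro L fl _
  unfold Spec_allocate_string
  simp only [allocate_string, allocate_string_alt]
  have hkeys : (PySem.Dict.ofList fl).keys = (PySem.Dict.ofList fl).items.map Prod.fst := rfl
  rw [hkeys, sorted_find?_eq_foldl]
  exact foldl_keys_eq_foldl_items _ L _ none
    (fun p hp => by
      obtain ⟨k, v⟩ := p
      exact PySem.Dict.getD_of_mem_items _ hp (PySem.Dict.nodup_keys_ofList fl) 0)
    (fun b hb => by cases hb)
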